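-- pv_equiv track=rewrite | github.com/GaryBriceno/prueba_w | solution_01/01.py | get_happiness_without_repetition
-- ===== SOURCE A (Python) =====
-- def get_happiness_without_repetition(numbers, like_numbers, dislike_numbers):
--     """
--     This function get the happiness, consider only the unique numbers
--     """
--     numbers = set(numbers)
--     happines = 0
--     for element in numbers:
--         if element in like_numbers:
--             happines += 1
--         if element in dislike_numbers:
--             happines -= 1
--     return happines
-- ===== SOURCE B (Python) =====
-- def get_happiness_without_repetition(numbers, like_numbers, dislike_numbers):
--     # Sort the deduplicated lists and count intersections with a two-pointer merge.
--     uniq = sorted(set(numbers))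
--     likes = sorted(set(like_numbers))
--     dislikes = sorted(set(dislike_numbers))
--     return _merge_count(uniq, likes) - _merge_count(uniq, dislikes)
--
-- def _merge_count(a, b):
--     i = j = c = 0
--     while i < len(a) and j < len(b):
--         if a[i] < b[j]:
--             i += 1
--         elif b[j] < a[i]:
--             j += 1
--         else:
--             c += 1
--             i += 1
--             j += 1
--     return c
-- ===== Notes on version B (the rewrite author's own statement) =====
-- stated objective: faster
-- what changed: Replaces A's per-element loop with list-membership tests by a sort-and-merge algorithm: the three inputs are deduplicated and sorted, and the happiness is the difference of two intersection sizes computed by a two-pointer merge over the sorted lists.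
import Mathlib
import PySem

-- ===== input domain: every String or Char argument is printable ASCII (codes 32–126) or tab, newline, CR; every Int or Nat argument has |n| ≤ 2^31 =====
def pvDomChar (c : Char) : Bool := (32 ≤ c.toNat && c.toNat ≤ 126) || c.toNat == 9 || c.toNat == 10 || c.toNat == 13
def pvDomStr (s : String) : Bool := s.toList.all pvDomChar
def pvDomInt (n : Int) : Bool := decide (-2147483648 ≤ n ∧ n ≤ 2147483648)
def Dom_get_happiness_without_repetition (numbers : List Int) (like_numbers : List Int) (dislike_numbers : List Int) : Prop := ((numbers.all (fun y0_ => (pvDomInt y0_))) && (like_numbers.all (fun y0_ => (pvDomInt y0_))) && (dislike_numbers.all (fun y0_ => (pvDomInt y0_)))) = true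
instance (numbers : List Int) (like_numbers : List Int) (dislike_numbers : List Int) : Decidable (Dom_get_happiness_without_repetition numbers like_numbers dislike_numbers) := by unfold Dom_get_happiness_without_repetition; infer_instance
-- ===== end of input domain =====

-- B replaces A's per-element membership loop by sort-and-merge: dedup+sort all three lists,
-- then subtract two intersection counts computed by a two-pointer merge (objective: alternative).
-- ===== PORT A =====
-- A: numbers = set(numbers); loop over its elements, +1 if in like_numbers, -1 if in dislike_numbers.
-- (The loop's result is order-independent, so folding the Set's list is exact.)
def get_happiness_without_repetition (numbers : List Int) (like_numbers : List Int) (dislike_numbers : List Int) : Int :=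
  (PySem.Set.ofList numbers).foldl
    (fun happines element =>
      let happines := if element ∈ like_numbers then happines + 1 else happines
      if element ∈ dislike_numbers then happines - 1 else happines)
    0

-- ===== PORT B =====
-- _merge_count's while loop over indices i, j, ported as the obvious structural
-- recursion over the two list suffixes (same comparisons, same order), accumulator c inlined.
def pvMergeCount : List Int → List Int → Int
  | [], _ => 0
  | _ :: _, [] => 0
  | x :: xs, y :: ys =>
    if x < y then pvMergeCount xs (y :: ys)
    else if y < x then pvMergeCount (x :: xs) ys
    else 1 + pvMergeCount xs ys

-- B: sorted(set(...)) for all three lists, then _merge_count(uniq, likes) - _merge_count(uniq, dislikes)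
def get_happiness_without_repetition_alt (numbers : List Int) (like_numbers : List Int) (dislike_numbers : List Int) : Int :=
  let uniq := PySem.List.sorted (PySem.Set.ofList numbers) (fun x => x) false
  let likes := PySem.List.sorted (PySem.Set.ofList like_numbers) (fun x => x) false
  let dislikes := PySem.List.sorted (PySem.Set.ofList dislike_numbers) (fun x => x) false
  pvMergeCount uniq likes - pvMergeCount uniq dislikes

-- ===== PRECONDITION & SPEC =====
def Spec_get_happiness_without_repetition (numbers : List Int) (like_numbers : List Int) (dislike_numbers : List Int) (out : Int) : Prop := out = get_happiness_without_repetition_alt numbers like_numbers dislike_numbers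
instance (numbers : List Int) (like_numbers : List Int) (dislike_numbers : List Int) (out : Int) : Decidable (Spec_get_happiness_without_repetition numbers like_numbers dislike_numbers out) := by unfold Spec_get_happiness_without_repetition; infer_instance

-- ===== CLAIM =====
def Claim_equal_get_happiness_without_repetition : Prop := ∀ (numbers : List Int) (like_numbers : List Int) (dislike_numbers : List Int), Dom_get_happiness_without_repetition numbers like_numbers dislike_numbers → Spec_get_happiness_without_repetition numbers like_numbers dislike_numbers (get_happiness_without_repetition numbers like_numbers dislike_numbers)

-- ===== LEMMAS AND PROOFS =====

-- A's loop computes, over any list u, count of elements in `like` minus count in `dislike`.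
theorem happy_foldl (like dislike : List Int) (u : List Int) (a : Int) :
    u.foldl
      (fun happines element =>
        let happines := if element ∈ like then happines + 1 else happines
        if element ∈ dislike then happines - 1 else happines)
      a
    = a + ((u.filter (fun x => decide (x ∈ like))).length : Int)
        - ((u.filter (fun x => decide (x ∈ dislike))).length : Int) := by
  induction u generalizing a with
  | nil => simp
  | cons x xs ih =>
    simp only [List.foldl_cons, List.filter_cons]
    by_cases hl : x ∈ like <;> by_cases hd : x ∈ dislike <;>
      simp [hl, hd, ih] <;> omega

-- On strictly increasing lists, the two-pointer merge counts a's elements that lie in b.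
theorem pvMergeCount_eq (a b : List Int) (ha : a.Pairwise (· < ·)) (hb : b.Pairwise (· < ·)) :
    pvMergeCount a b = ((a.filter (fun x => decide (x ∈ b))).length : Int) := by
  fun_induction pvMergeCount a b with
  | case1 b => simp
  | case2 x xs => simp
  | case3 x xs y ys hlt ih =>
    have hxnb : x ∉ y :: ys := by
      intro hm
      rcases List.mem_cons.mp hm with h | h
      · omega
      · have := (List.pairwise_cons.mp hb).1 x h; omega
    rw [List.filter_cons_of_neg (by simpa using hxnb)]
    exact ih (List.pairwise_cons.mp ha).2 hb
  | case4 x xs y ys hlt hgt ih =>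
    have hcong : ∀ z ∈ x :: xs, decide (z ∈ y :: ys) = decide (z ∈ ys) := by
      intro z hz
      have hzy : y < z := by
        rcases List.mem_cons.mp hz with h | h
        · omega
        · have := (List.pairwise_cons.mp ha).1 z h; omega
      simp [List.mem_cons]
      omega
    rw [List.filter_congr hcong]
    exact ih ha (List.pairwise_cons.mp hb).2
  | case5 x xs y ys hlt hgt ih =>
    have hxy : x = y := by omega
    have hcong : ∀ z ∈ xs, decide (z ∈ y :: ys) = decide (z ∈ ys) := by
      intro z hz
      have := (List.pairwise_cons.mp ha).1 z hz
      simp [List.mem_cons]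
      omega
    rw [List.filter_cons_of_pos (by simp [hxy]), List.filter_congr hcong]
    rw [ih (List.pairwise_cons.mp ha).2 (List.pairwise_cons.mp hb).2]
    simp; omega

-- The merge of sorted(set(ns)) with sorted(set(l)) counts distinct elements of ns that are in l.
theorem pvMergeCount_sorted (ns l : List Int) :
    pvMergeCount (PySem.List.sorted (PySem.Set.ofList ns) (fun x => x) false)
      (PySem.List.sorted (PySem.Set.ofList l) (fun x => x) false)
    = (((PySem.Set.ofList ns : List Int).filter (fun x => decide (x ∈ l))).length : Int) := by
  rw [pvMergeCount_eq _ _ (PySem.List.sorted_ofList_pairwise_lt ns)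
    (PySem.List.sorted_ofList_pairwise_lt l)]
  have hcong : ∀ z ∈ PySem.List.sorted (PySem.Set.ofList ns) (fun x => x) false,
      decide (z ∈ PySem.List.sorted (PySem.Set.ofList l) (fun x => x) false) = decide (z ∈ l) := by
    intro z _
    simp [PySem.List.mem_sorted, PySem.Set.mem_ofList]
  rw [List.filter_congr hcong]
  have hperm : (PySem.List.sorted (PySem.Set.ofList ns) (fun x => x) false).Perm
      (PySem.Set.ofList ns : List Int) := PySem.List.sorted_perm _ _ _
  exact congrArg _ ((hperm.filter _).length_eq)

-- ===== VERDICT =====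
theorem get_happiness_without_repetition_spec : Claim_equal_get_happiness_without_repetition := by
  intro numbers like dislike _
  show _ = _
  unfold get_happiness_without_repetition get_happiness_without_repetition_alt
  rw [happy_foldl]
  simp only [pvMergeCount_sorted]
  omega
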